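-- pv_equiv track=rewrite | github.com/kernelci/kernelci-backend | app/utils/callback/lava.py | _prepare_lines_map
-- ===== SOURCE A (Python) =====
-- from collections import OrderedDict
--
-- def _prepare_lines_map(end_lines_map, start_log_line):
--     lines_map = OrderedDict(sorted(end_lines_map.items(),
--                                    key=lambda i: i[1]))
--     start_line = start_log_line
--     for path, end_line in lines_map.items():
--         lines_map[path] = (start_line, end_line)
--         start_line = end_line + 1
--     return lines_map
-- ===== SOURCE B (Python) =====
-- from collections import OrderedDict
--
-- def _prepare_lines_map(end_lines_map, start_log_line):
--     # Selection-based: no sort of the items; repeatedly extract the entry with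
--     # the smallest end line (the first one on ties) from parallel path/end lists.
--     paths = list(end_lines_map.keys())
--     ends = list(end_lines_map.values())
--     result = OrderedDict()
--     start = start_log_line
--     while ends:
--         j = ends.index(min(ends))
--         end = ends.pop(j)
--         path = paths.pop(j)
--         result[path] = (start, end)
--         start = end + 1
--     return result
-- ===== Notes on version B (the rewrite author's own statement) =====
-- stated objective: alternative
-- what changed: B drops the sorted() call entirely: it splits the dict into parallel path/end lists and repeatedly extracts the first entry with the smallest end line (min + index + pop, selection style), assigning each range as it goes.
import Mathlib
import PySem

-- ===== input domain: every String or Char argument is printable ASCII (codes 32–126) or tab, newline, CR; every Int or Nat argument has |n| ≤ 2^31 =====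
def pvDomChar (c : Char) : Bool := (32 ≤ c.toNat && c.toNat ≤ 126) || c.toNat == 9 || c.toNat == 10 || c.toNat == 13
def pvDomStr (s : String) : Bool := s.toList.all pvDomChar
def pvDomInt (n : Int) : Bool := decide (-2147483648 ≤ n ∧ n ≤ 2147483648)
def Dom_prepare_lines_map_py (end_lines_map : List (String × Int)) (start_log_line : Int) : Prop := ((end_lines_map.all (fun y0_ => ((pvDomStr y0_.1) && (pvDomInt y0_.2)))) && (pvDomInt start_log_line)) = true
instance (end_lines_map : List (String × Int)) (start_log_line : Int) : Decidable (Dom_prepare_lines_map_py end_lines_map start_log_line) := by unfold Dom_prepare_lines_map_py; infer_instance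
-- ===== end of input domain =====

-- B replaces A's sort-then-rewrite by selection: it keeps parallel path/end lists and
-- repeatedly extracts the first entry with the smallest end line; no sorted() call
-- (alternative; not faster).


-- ===== PORT A =====
-- lines_map = OrderedDict(sorted(items, key=value)); then the loop overwrites each key's
-- value with (start_line, end_line) while threading start_line = end_line + 1.  Python
-- reuses the same dict with a new value type; the typed port inserts the tuple value at
-- each key of the sorted items in loop order (identical keys/order on dict inputs, whose
-- keys are distinct — see Pre_ below).
def prepare_lines_map_py (end_lines_map : List (String × Int)) (start_log_line : Int) : List (String × Int × Int) :=
  let sortedItems := PySem.List.sorted end_lines_map (fun i => i.2) false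
  let res := sortedItems.foldl
    (fun (st : PySem.Dict String (Int × Int) × Int) pe =>
      (st.1.insert pe.1 (st.2, pe.2), pe.2 + 1))
    (PySem.Dict.empty, start_log_line)
  res.1.items

-- ===== PORT B =====
-- the while loop: j = ends.index(min(ends)); end = ends.pop(j); path = paths.pop(j);
-- result[path] = (start, end); start = end + 1.  min/index/pop are the PySem primitives;
-- the `none` fallbacks are unreachable in Python (min exists iff the list is nonempty,
-- index of the minimum is in range, and the two lists have equal length).
def pvLoopB (paths : List String) (ends : List Int) (start : Int)
    (res : PySem.Dict String (Int × Int)) : PySem.Dict String (Int × Int) :=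
  match PySem.List.min? ends (fun x => x) with
  | none => res            -- while ends: — loop finished
  | some m =>
    match PySem.List.index? ends m with
    | none => res          -- unreachable: min(ends) ∈ ends
    | some j =>
      match h3 : PySem.List.pop? ends (j : Int), _h4 : PySem.List.pop? paths (j : Int) with
      | some (e, ends'), some (p, paths') =>
          pvLoopB paths' ends' (e + 1) (res.insert p (start, e))
      | _, _ => res        -- unreachable: j is in range of both equally long lists
termination_by ends.length
decreasing_by
  have := PySem.List.length_of_pop?_eq_some ends h3
  simp at this; omega

def prepare_lines_map_py_alt (end_lines_map : List (String × Int)) (start_log_line : Int) : List (String × Int × Int) :=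
  let paths := end_lines_map.map (fun kv => kv.1)
  let ends := end_lines_map.map (fun kv => kv.2)
  (pvLoopB paths ends start_log_line PySem.Dict.empty).items

-- ===== PRECONDITION & SPEC =====
-- The first argument represents a Python dict, so its keys are distinct; Pre_ states
-- exactly that (every dict input satisfies it; duplicate-key lists denote no dict).
def Pre_prepare_lines_map_py (end_lines_map : List (String × Int)) (start_log_line : Int) : Prop :=
  (end_lines_map.map Prod.fst).Nodup
instance (end_lines_map : List (String × Int)) (start_log_line : Int) : Decidable (Pre_prepare_lines_map_py end_lines_map start_log_line) := by unfold Pre_prepare_lines_map_py; infer_instance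
def pvWitness_prepare_lines_map_py : (List (String × Int)) × Int := ([("a", 5), ("b", 2)], 1)

def Spec_prepare_lines_map_py (end_lines_map : List (String × Int)) (start_log_line : Int) (out : List (String × Int × Int)) : Prop := out = prepare_lines_map_py_alt end_lines_map start_log_line
instance (end_lines_map : List (String × Int)) (start_log_line : Int) (out : List (String × Int × Int)) : Decidable (Spec_prepare_lines_map_py end_lines_map start_log_line out) := by unfold Spec_prepare_lines_map_py; infer_instance

-- ===== CLAIM (what is proved, stated in full; the proofs are below) =====
def Claim_equal_prepare_lines_map_py : Prop := ∀ (end_lines_map : List (String × Int)) (start_log_line : Int), Dom_prepare_lines_map_py end_lines_map start_log_line → Pre_prepare_lines_map_py end_lines_map start_log_line → Spec_prepare_lines_map_py end_lines_map start_log_line (prepare_lines_map_py end_lines_map start_log_line)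

-- ===== LEMMAS AND PROOFS =====

-- The assignment of line ranges to an (already value-sorted) item list.
def pvAssign : List (String × Int) → Int → List (String × Int × Int)
  | [], _ => []
  | (p, e) :: t, s => (p, s, e) :: pvAssign t (e + 1)

-- Abbreviation for one stable insertion step of A's sort (key = second component).
def pvIns (x : String × Int) (acc : List (String × Int)) : List (String × Int) :=
  PySem.List.insertBy (fun a b => decide (a.2 < b.2)) x acc

theorem pvIns_nil (x : String × Int) : pvIns x [] = [x] := rfl

theorem pvIns_cons (x a : String × Int) (r : List (String × Int)) :
    pvIns x (a :: r) = if a.2 ≤ x.2 then a :: pvIns x r else x :: a :: r := by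
  simp only [pvIns, PySem.List.insertBy]
  by_cases h : x.2 < a.2
  · simp [h, show ¬ a.2 ≤ x.2 by omega]
  · simp [h, show a.2 ≤ x.2 by omega]

-- Strictly smaller elements commute past insertions.
theorem pvIns_comm (m y : String × Int) (h : m.2 < y.2) (acc : List (String × Int)) :
    pvIns m (pvIns y acc) = pvIns y (pvIns m acc) := by
  induction acc with
  | nil =>
    rw [pvIns_nil, pvIns_nil, pvIns_cons, pvIns_cons,
        if_neg (show ¬ y.2 ≤ m.2 by omega), if_pos (show m.2 ≤ y.2 by omega), pvIns_nil]
  | cons a r ih =>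
    by_cases h1 : a.2 ≤ m.2
    · have h2 : a.2 ≤ y.2 := by omega
      rw [pvIns_cons m a r, if_pos h1, pvIns_cons y a r, if_pos h2,
          pvIns_cons y a (pvIns m r), if_pos h2, pvIns_cons m a (pvIns y r), if_pos h1, ih]
    · by_cases h2 : a.2 ≤ y.2
      · rw [pvIns_cons m a r, if_neg h1, pvIns_cons y a r, if_pos h2,
            pvIns_cons y m (a :: r), if_pos (by omega), pvIns_cons y a r, if_pos h2,
            pvIns_cons m a (pvIns y r)]
        rw [if_neg h1]
      · rw [pvIns_cons m a r, if_neg h1, pvIns_cons y a r, if_neg h2,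
            pvIns_cons y m (a :: r), if_pos (by omega), pvIns_cons y a r, if_neg h2,
            pvIns_cons m y (a :: r), if_neg (by omega)]

-- Folding insertions of strictly larger elements commutes with one pending insertion.
theorem pvFold_comm (m : String × Int) (pre : List (String × Int))
    (h : ∀ y ∈ pre, m.2 < y.2) (acc : List (String × Int)) :
    List.foldl (fun acc x => pvIns x acc) (pvIns m acc) pre
      = pvIns m (List.foldl (fun acc x => pvIns x acc) acc pre) := by
  induction pre generalizing acc with
  | nil => rfl
  | cons y t ih =>
    simp only [List.foldl_cons]
    rw [← pvIns_comm m y (h y (by simp)) acc, ih (fun z hz => h z (by simp [hz]))]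

-- A minimal element at the head of the accumulator stays at the head.
theorem pvFold_min_head (m : String × Int) (l : List (String × Int))
    (h : ∀ y ∈ l, m.2 ≤ y.2) (acc : List (String × Int)) :
    List.foldl (fun acc x => pvIns x acc) (m :: acc) l
      = m :: List.foldl (fun acc x => pvIns x acc) acc l := by
  induction l generalizing acc with
  | nil => rfl
  | cons y t ih =>
    simp only [List.foldl_cons]
    rw [pvIns_cons y m acc, if_pos (h y (by simp)), ih (fun z hz => h z (by simp [hz]))]

-- SELECTION LEMMA: the stable sort puts the first minimal element in front,
-- and sorts the rest.
theorem pv_sorted_select (pre suf : List (String × Int)) (m : String × Int)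
    (hpre : ∀ y ∈ pre, m.2 < y.2) (hmin : ∀ y ∈ pre ++ suf, m.2 ≤ y.2) :
    PySem.List.sorted (pre ++ m :: suf) (fun i => i.2) false
      = m :: PySem.List.sorted (pre ++ suf) (fun i => i.2) false := by
  rw [PySem.List.sorted_eq_foldl_insertBy, PySem.List.sorted_eq_foldl_insertBy]
  show List.foldl (fun acc x => pvIns x acc) [] (pre ++ m :: suf)
      = m :: List.foldl (fun acc x => pvIns x acc) [] (pre ++ suf)
  rw [List.foldl_append, List.foldl_cons,
      ← pvFold_comm m pre hpre [], pvIns_nil, ← List.foldl_append,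
      show ([m] : List (String × Int)) = m :: [] from rfl,
      pvFold_min_head m (pre ++ suf) hmin []]

-- Index form of the selection lemma: j is the first index of a minimal value.
theorem pv_sorted_eraseIdx (l : List (String × Int)) (j : Nat) (hj : j < l.length)
    (hfirst : ∀ i (hi : i < j), l[j].2 < (l[i]'(by omega)).2)
    (hmin : ∀ y ∈ l, l[j].2 ≤ y.2) :
    PySem.List.sorted l (fun i => i.2) false
      = l[j] :: PySem.List.sorted (l.eraseIdx j) (fun i => i.2) false := by
  have hsplit : l = l.take j ++ l[j] :: l.drop (j + 1) := by
    conv_lhs => rw [← List.take_append_drop j l]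
    rw [List.drop_eq_getElem_cons hj]
  have herase : l.eraseIdx j = l.take j ++ l.drop (j + 1) :=
    List.eraseIdx_eq_take_drop_succ l j
  have hpre : ∀ y ∈ l.take j, l[j].2 < y.2 := by
    intro y hy
    obtain ⟨i, hi, hyi⟩ := List.getElem_of_mem hy
    have hij : i < j := by
      have := List.length_take_le j l; omega
    rw [List.getElem_take] at hyi
    exact hyi ▸ hfirst i hij
  have hmin' : ∀ y ∈ l.take j ++ l.drop (j + 1), l[j].2 ≤ y.2 := by
    intro y hy
    apply hmin
    rcases List.mem_append.mp hy with h | h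
    · exact List.mem_of_mem_take h
    · exact List.mem_of_mem_drop h
  rw [herase]
  conv_lhs => rw [hsplit]
  exact pv_sorted_select _ _ _ hpre hmin'

-- B's loop, run on the split-off columns of a pair list, performs exactly the
-- dict insertions of pvAssign of the stable sort.
theorem pv_loopB_eq (n : Nat) : ∀ (l : List (String × Int)), l.length = n →
    ∀ (s : Int) (d : PySem.Dict String (Int × Int)),
    pvLoopB (l.map Prod.fst) (l.map Prod.snd) s d
      = (pvAssign (PySem.List.sorted l (fun i => i.2) false) s).foldl
          (fun d kv => d.insert kv.1 kv.2) d := by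
  induction n using Nat.strong_induction_on with
  | _ n ih =>
    intro l hl s d
    match l with
    | [] => simp [pvLoopB]; rfl
    | x :: t =>
      set L := x :: t with hL
      have hne : L.map Prod.snd ≠ [] := by simp [hL]
      obtain ⟨m, hm⟩ : ∃ m, PySem.List.min? (L.map Prod.snd) (fun x => x) = some m := by
        cases h : PySem.List.min? (L.map Prod.snd) (fun x => x) with
        | none => exact absurd ((PySem.List.min?_eq_none_iff _ _).mp h) hne
        | some m => exact ⟨m, rfl⟩
      have hmem : m ∈ L.map Prod.snd := PySem.List.min?_mem hm
      have hminv : ∀ y ∈ L.map Prod.snd, m ≤ y := PySem.List.min?_isMin hm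
      obtain ⟨j, hj⟩ : ∃ j, PySem.List.index? (L.map Prod.snd) m = some j := by
        cases h : PySem.List.index? (L.map Prod.snd) m with
        | none => exact absurd ((PySem.List.index?_eq_none_iff _ _).mp h) (by simp [hmem])
        | some j => exact ⟨j, rfl⟩
      obtain ⟨hjlt, hjv, hjfirst⟩ := PySem.List.getElem_of_index?_eq_some hj
      have hjl : j < L.length := by simpa using hjlt
      -- translate the index facts to the pair list
      have hLj : (L.map Prod.snd)[j] = L[j].2 := by simp
      have hfirst : ∀ i (hi : i < j), L[j].2 < (L[i]'(by omega)).2 := by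
        intro i hi
        have hne' : (L.map Prod.snd)[i]'(by simp; omega) ≠ m := hjfirst i hi
        have hle : m ≤ (L.map Prod.snd)[i]'(by simp; omega) :=
          hminv _ (by apply List.getElem_mem)
        have : (L.map Prod.snd)[i]'(by simp; omega) = (L[i]'(by omega)).2 := by simp
        rw [this] at hne' hle
        rw [← hLj, hjv]
        omega
      have hminL : ∀ y ∈ L, L[j].2 ≤ y.2 := by
        intro y hy
        rw [← hLj, hjv]
        exact hminv y.2 (List.mem_map_of_mem hy)
      -- one unfolding of pvLoopB
      have hpopE : PySem.List.pop? (L.map Prod.snd) (j : Int)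
          = some ((L.map Prod.snd)[j]'hjlt, (L.map Prod.snd).eraseIdx j) :=
        PySem.List.pop?_natCast _ j hjlt
      have hpopP : PySem.List.pop? (L.map Prod.fst) (j : Int)
          = some ((L.map Prod.fst)[j]'(by simp; omega), (L.map Prod.fst).eraseIdx j) :=
        PySem.List.pop?_natCast _ j (by simp; omega)
      have hlen : (L.eraseIdx j).length < n := by
        rw [List.length_eraseIdx_of_lt hjl]; omega
      rw [pvLoopB]
      simp only [hm, hj]
      split
      case _ e ends' p paths' heq3 heq4 =>
        rw [hpopE] at heq3
        rw [hpopP] at heq4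
        simp only [Option.some.injEq, Prod.mk.injEq] at heq3 heq4
        obtain ⟨he, hends⟩ := heq3
        obtain ⟨hp, hpaths⟩ := heq4
        subst he hends hp hpaths
        rw [show ((L.map Prod.snd).eraseIdx j) = (L.eraseIdx j).map Prod.snd by
              simp [List.eraseIdx_map],
            show ((L.map Prod.fst).eraseIdx j) = (L.eraseIdx j).map Prod.fst by
              simp [List.eraseIdx_map]]
        rw [ih _ hlen (L.eraseIdx j) rfl]
        have h1 : (L.map Prod.snd)[j]'hjlt = L[j].2 := by simp
        have h2 : (L.map Prod.fst)[j]'(by simp; omega) = L[j].1 := by simp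
        rw [h1, h2, pv_sorted_eraseIdx L j hjl hfirst hminL]
        rfl
      case _ h =>
        exact (h _ _ _ _ hpopE hpopP).elim

-- A's loop: inserting fresh distinct keys while threading start_line appends pvAssign.
theorem pv_foldA (s : List (String × Int)) (d : PySem.Dict String (Int × Int)) (s0 : Int)
    (hf : ∀ pe ∈ s, d.contains pe.1 = false) (hn : (s.map Prod.fst).Nodup) :
    ((s.foldl (fun (st : PySem.Dict String (Int × Int) × Int) pe =>
        (st.1.insert pe.1 (st.2, pe.2), pe.2 + 1)) (d, s0)).1).items
      = d.items ++ pvAssign s s0 := by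
  induction s generalizing d s0 with
  | nil => simp [pvAssign]
  | cons pe t ih =>
    obtain ⟨p, e⟩ := pe
    have hfresh : d.contains p = false := hf (p, e) (List.mem_cons_self)
    have hn' : (t.map Prod.fst).Nodup := (List.nodup_cons.mp hn).2
    have hp_not : p ∉ t.map Prod.fst := (List.nodup_cons.mp hn).1
    have hf' : ∀ qe ∈ t, (d.insert p (s0, e)).contains qe.1 = false := by
      intro qe hq
      have hne : qe.1 ≠ p := by
        intro h; exact hp_not (h ▸ List.mem_map_of_mem hq)
      rw [PySem.Dict.contains_insert]
      simp [hne, hf qe (List.mem_cons_of_mem _ hq)]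
    rw [List.foldl_cons]
    have := ih (d.insert p (s0, e)) (e + 1) hf' hn'
    rw [this, PySem.Dict.items_insert, hfresh, pvAssign]
    simp only [Bool.false_eq_true, if_false]
    simp

-- Dict-ifying a list with distinct keys over fresh ground appends it to the items.
theorem pv_dictify (s : List (String × Int × Int)) (d : PySem.Dict String (Int × Int))
    (hf : ∀ kv ∈ s, d.contains kv.1 = false) (hn : (s.map Prod.fst).Nodup) :
    (s.foldl (fun d kv => d.insert kv.1 kv.2) d).items = d.items ++ s := by
  induction s generalizing d with
  | nil => simp
  | cons kv t ih =>
    obtain ⟨p, v⟩ := kv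
    have hfresh : d.contains p = false := hf (p, v) (List.mem_cons_self)
    have hn' : (t.map Prod.fst).Nodup := (List.nodup_cons.mp hn).2
    have hp_not : p ∉ t.map Prod.fst := (List.nodup_cons.mp hn).1
    have hf' : ∀ qv ∈ t, (d.insert p v).contains qv.1 = false := by
      intro qv hq
      have hne : qv.1 ≠ p := by
        intro h; exact hp_not (h ▸ List.mem_map_of_mem hq)
      rw [PySem.Dict.contains_insert]
      simp [hne, hf qv (List.mem_cons_of_mem _ hq)]
    rw [List.foldl_cons]
    have := ih (d.insert p v) hf'
    rw [this hn', PySem.Dict.items_insert, hfresh]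
    simp only [Bool.false_eq_true, if_false]
    simp

theorem pvAssign_keys (s : List (String × Int)) (s0 : Int) :
    (pvAssign s s0).map Prod.fst = s.map Prod.fst := by
  induction s generalizing s0 with
  | nil => rfl
  | cons pe t ih => obtain ⟨p, e⟩ := pe; simp [pvAssign, ih]

theorem prepare_lines_map_py_spec : Claim_equal_prepare_lines_map_py := by
  intro elm s0 _ hpre
  unfold Spec_prepare_lines_map_py
  have hperm : (PySem.List.sorted elm (fun i => i.2) false).Perm elm :=
    PySem.List.sorted_perm elm (fun i => i.2) false
  have hn : ((PySem.List.sorted elm (fun i => i.2) false).map Prod.fst).Nodup :=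
    ((hperm.map Prod.fst).nodup_iff).mpr hpre
  -- A's side: the fold's items are exactly pvAssign of the sorted items
  have hA : prepare_lines_map_py elm s0
      = pvAssign (PySem.List.sorted elm (fun i => i.2) false) s0 := by
    simp only [prepare_lines_map_py]
    rw [pv_foldA _ _ _ (by intro pe _; simp [PySem.Dict.contains_empty]) hn]
    simp [PySem.Dict.empty]
  -- B's side: the selection loop performs the same insertions
  have hB : prepare_lines_map_py_alt elm s0
      = pvAssign (PySem.List.sorted elm (fun i => i.2) false) s0 := by
    simp only [prepare_lines_map_py_alt]
    rw [pv_loopB_eq elm.length elm rfl s0 PySem.Dict.empty]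
    rw [pv_dictify _ _ (by intro kv _; simp [PySem.Dict.contains_empty])
        (by rw [pvAssign_keys]; exact hn)]
    simp [PySem.Dict.empty]
  rw [hA, hB]
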